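-- pv_equiv track=rewrite | github.com/MrBrantCode/unitest_baseline | mut_generate/mist_train_taco/taco_7722/solution.py | is_rectangle_of_ones
-- ===== SOURCE A (Python) =====
-- def is_rectangle_of_ones(test_cases):
--     results = []
--
--     for case in test_cases:
--         N, M, grid = case
--         min_row, max_row = N, -1
--         min_col, max_col = M, -1
--
--         # Find the bounding box of '1's
--         for i in range(N):
--             for j in range(M):
--                 if grid[i][j] == '1':
--                     if i < min_row:
--                         min_row = i
--                     if i > max_row:
--                         max_row = i
--                     if j < min_col:
--                         min_col = j
--                     if j > max_col:
--                         max_col = j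
--
--         # Check if all '1's are within the bounding box
--         is_rectangle = True
--         for i in range(min_row, max_row + 1):
--             for j in range(min_col, max_col + 1):
--                 if grid[i][j] != '1':
--                     is_rectangle = False
--                     break
--             if not is_rectangle:
--                 break
--
--         results.append("YES" if is_rectangle else "NO")
--
--     return results
-- ===== SOURCE B (Python) =====
-- def _check(N, M, grid):
--     cnt = 0
--     min_row, max_row = N, -1
--     min_col, max_col = M, -1
--     for i in range(N):
--         for j in range(M):
--             if grid[i][j] == '1':
--                 cnt += 1
--                 min_row = min(min_row, i)
--                 max_row = max(max_row, i)
--                 min_col = min(min_col, j)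
--                 max_col = max(max_col, j)
--     ok = cnt == 0 or (max_row - min_row + 1) * (max_col - min_col + 1) == cnt
--     return "YES" if ok else "NO"
--
--
-- def is_rectangle_of_ones(test_cases):
--     return [_check(N, M, grid) for (N, M, grid) in test_cases]
-- ===== Notes on version B (the rewrite author's own statement) =====
-- stated objective: simpler
-- what changed: B drops A's second scan over the bounding box entirely: it counts the '1' cells while finding the bounding box in the single scan and answers YES iff the count is 0 or equals the bounding-box area (count == area identity).
-- outside the precondition, e.g. on is_rectangle_of_ones([(-2, -1, ['10', '00'])]): A returns ['NO'], B returns ['YES']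
import Mathlib
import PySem

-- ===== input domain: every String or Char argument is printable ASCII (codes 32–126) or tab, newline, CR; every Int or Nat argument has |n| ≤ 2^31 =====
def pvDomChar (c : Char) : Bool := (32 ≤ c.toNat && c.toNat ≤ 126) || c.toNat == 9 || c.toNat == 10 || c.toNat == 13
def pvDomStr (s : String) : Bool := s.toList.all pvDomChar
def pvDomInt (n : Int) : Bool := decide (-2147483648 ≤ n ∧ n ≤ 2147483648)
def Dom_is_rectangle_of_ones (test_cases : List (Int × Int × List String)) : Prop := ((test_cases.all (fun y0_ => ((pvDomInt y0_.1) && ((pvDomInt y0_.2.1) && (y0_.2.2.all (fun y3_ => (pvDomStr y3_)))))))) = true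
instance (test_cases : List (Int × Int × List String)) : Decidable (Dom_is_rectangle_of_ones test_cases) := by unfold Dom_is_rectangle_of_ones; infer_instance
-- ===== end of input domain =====

-- B removes A's second scan over the bounding box: it counts the '1' cells during the single
-- bounding-box scan and answers with the count == bounding-box-area identity.

-- grid[i][j] (Python indexing; exact on the in-range indices Pre_ guarantees; both Pythons write this access)
def pvCell (grid : List String) (i j : Int) : Char :=
  PySem.List.pyGetD (PySem.List.pyGetD grid i "").toList j ' '

-- ===== PORT A =====
-- the four 'if' updates inside A's first scan
def pvBboxStep (st : Int × Int × Int × Int) (i j : Int) : Int × Int × Int × Int :=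
  let mr := if i < st.1 then i else st.1
  let Mr := if i > st.2.1 then i else st.2.1
  let mc := if j < st.2.2.1 then j else st.2.2.1
  let Mc := if j > st.2.2.2 then j else st.2.2.2
  (mr, Mr, mc, Mc)

-- A's first double loop: the bounding box of the '1's
def pvScanA (N M : Int) (grid : List String) : Int × Int × Int × Int :=
  (PySem.List.pyRange 0 N 1).foldl (fun st i =>
    (PySem.List.pyRange 0 M 1).foldl (fun st j =>
      if pvCell grid i j == '1' then pvBboxStep st i j else st) st) (N, -1, M, -1)

-- A's inner check loop with its break (early exit on a non-'1')
def pvCheckCols (grid : List String) (i : Int) : List Int → Bool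
  | [] => true
  | j :: rest => if pvCell grid i j != '1' then false else pvCheckCols grid i rest

-- A's outer check loop with its break
def pvCheckRows (grid : List String) (mc Mc : Int) : List Int → Bool
  | [] => true
  | i :: rest =>
      if pvCheckCols grid i (PySem.List.pyRange mc (Mc + 1) 1) then pvCheckRows grid mc Mc rest
      else false

def pvCaseA (c : Int × Int × List String) : String :=
  let st := pvScanA c.1 c.2.1 c.2.2
  let isRect := pvCheckRows c.2.2 st.2.2.1 st.2.2.2 (PySem.List.pyRange st.1 (st.2.1 + 1) 1)
  if isRect then "YES" else "NO"

def is_rectangle_of_ones (test_cases : List (Int × Int × List String)) : List String :=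
  test_cases.foldl (fun results c => results ++ [pvCaseA c]) []

-- ===== PORT B =====
-- B's single scan: count of ones plus the bounding box, maintained with min/max
def pvScanB (N M : Int) (grid : List String) : Int × Int × Int × Int × Int :=
  (PySem.List.pyRange 0 N 1).foldl (fun st i =>
    (PySem.List.pyRange 0 M 1).foldl (fun st j =>
      if pvCell grid i j == '1' then
        (st.1 + 1, min st.2.1 i, max st.2.2.1 i, min st.2.2.2.1 j, max st.2.2.2.2 j)
      else st) st) (0, N, -1, M, -1)

def pvCaseB (c : Int × Int × List String) : String :=
  let st := pvScanB c.1 c.2.1 c.2.2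
  if st.1 == 0 || (st.2.2.1 - st.2.1 + 1) * (st.2.2.2.2 - st.2.2.2.1 + 1) == st.1 then "YES"
  else "NO"

def is_rectangle_of_ones_alt (test_cases : List (Int × Int × List String)) : List String :=
  test_cases.map pvCaseB

-- ===== PRECONDITION & SPEC =====
-- Pre_ excludes (a) inputs on which Python A raises IndexError (a declared dimension exceeding the
-- grid it indexes), and (b) test cases whose declared dimensions N and M are BOTH negative — outside
-- the problem's natural domain — where A's bounding-box re-scan hits Python's negative-index
-- wraparound; B naturally answers "YES" there (no '1' is ever counted).
def Pre_is_rectangle_of_ones (test_cases : List (Int × Int × List String)) : Prop :=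
  ∀ c ∈ test_cases, (0 ≤ c.1 ∨ 0 ≤ c.2.1) ∧
    (1 ≤ c.1 → 1 ≤ c.2.1 →
      c.1 ≤ (c.2.2.length : Int) ∧ ∀ r ∈ c.2.2.take c.1.toNat, c.2.1 ≤ (r.toList.length : Int))
instance (test_cases : List (Int × Int × List String)) : Decidable (Pre_is_rectangle_of_ones test_cases) := by unfold Pre_is_rectangle_of_ones; infer_instance

def pvWitness_is_rectangle_of_ones : (List (Int × Int × List String)) := [(2, 2, ["11", "11"])]

def Spec_is_rectangle_of_ones (test_cases : List (Int × Int × List String)) (out : List String) : Prop := out = is_rectangle_of_ones_alt test_cases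
instance (test_cases : List (Int × Int × List String)) (out : List String) : Decidable (Spec_is_rectangle_of_ones test_cases out) := by unfold Spec_is_rectangle_of_ones; infer_instance

-- ===== CLAIM (what is proved, stated in full; the proofs are below) =====
def Claim_equal_is_rectangle_of_ones : Prop := ∀ (test_cases : List (Int × Int × List String)), Dom_is_rectangle_of_ones test_cases → Pre_is_rectangle_of_ones test_cases → Spec_is_rectangle_of_ones test_cases (is_rectangle_of_ones test_cases)

-- ===== LEMMAS AND PROOFS =====

-- the '1'-cells of the scanned region, in scan order
def pvP (grid : List String) (p : Int × Int) : Bool := pvCell grid p.1 p.2 == '1'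
def pvOnes (N M : Int) (grid : List String) : List (Int × Int) :=
  ((PySem.List.pyRange 0 N 1) ×ˢ (PySem.List.pyRange 0 M 1)).filter (pvP grid)
def pvMinMax (st : Int × Int × Int × Int) (p : Int × Int) : Int × Int × Int × Int :=
  (min st.1 p.1, max st.2.1 p.1, min st.2.2.1 p.2, max st.2.2.2 p.2)

theorem pv_nested_foldl_if {σ : Type} (xs ys : List Int) (q : Int → Int → Bool)
    (g : σ → Int → Int → σ) (init : σ) :
    xs.foldl (fun st i => ys.foldl (fun st j => if q i j then g st i j else st) st) init
      = ((xs ×ˢ ys).filter (fun p => q p.1 p.2)).foldl (fun st p => g st p.1 p.2) init := by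
  induction xs generalizing init with
  | nil => rfl
  | cons x xs ih =>
      rw [List.foldl_cons, ih, List.product_cons, List.filter_append, List.foldl_append]
      congr 1
      rw [List.filter_map, List.foldl_map, PySem.List.foldl_if_eq_foldl_filter]
      simp [Function.comp_def]

theorem pvBboxStep_eq (st : Int × Int × Int × Int) (p : Int × Int) :
    pvBboxStep st p.1 p.2 = pvMinMax st p := by
  unfold pvBboxStep pvMinMax
  refine Prod.ext ?_ (Prod.ext ?_ (Prod.ext ?_ ?_)) <;> simp [min_def, max_def] <;>
    split_ifs <;> omega

theorem pvScanA_eq (N M : Int) (grid : List String) :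
    pvScanA N M grid = (pvOnes N M grid).foldl pvMinMax (N, -1, M, -1) := by
  have h := pv_nested_foldl_if (PySem.List.pyRange 0 N 1) (PySem.List.pyRange 0 M 1)
    (fun i j => pvCell grid i j == '1') (fun st i j => pvBboxStep st i j) (N, -1, M, -1)
  refine Eq.trans (Eq.trans (by rfl) h) ?_
  exact PySem.List.foldl_congr_mem _ _ _ _ (fun acc p _ => pvBboxStep_eq acc p)

theorem pv_foldl_count_minmax (l : List (Int × Int)) (c : Int) (st : Int × Int × Int × Int) :
    l.foldl (fun s (p : Int × Int) =>
        ((s.1 + 1 : Int), min s.2.1 p.1, max s.2.2.1 p.1, min s.2.2.2.1 p.2, max s.2.2.2.2 p.2))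
      (c, st) = (c + l.length, l.foldl pvMinMax st) := by
  induction l generalizing c st with
  | nil => simp
  | cons p l ih =>
      rw [List.foldl_cons, List.foldl_cons]
      rw [show ((c, st).1 + 1, min (c, st).2.1 p.1, max (c, st).2.2.1 p.1,
            min (c, st).2.2.2.1 p.2, max (c, st).2.2.2.2 p.2)
          = ((c + 1 : Int), pvMinMax st p) from rfl, ih]
      simp; omega

theorem pvScanB_eq (N M : Int) (grid : List String) :
    pvScanB N M grid
      = (((pvOnes N M grid).length : Int), (pvOnes N M grid).foldl pvMinMax (N, -1, M, -1)) := by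
  have h := pv_nested_foldl_if (PySem.List.pyRange 0 N 1) (PySem.List.pyRange 0 M 1)
    (fun i j => pvCell grid i j == '1')
    (fun (s : Int × Int × Int × Int × Int) i j =>
      (s.1 + 1, min s.2.1 i, max s.2.2.1 i, min s.2.2.2.1 j, max s.2.2.2.2 j))
    (0, N, -1, M, -1)
  refine Eq.trans (Eq.trans (by rfl) h) ?_
  rw [show ((PySem.List.pyRange 0 N 1 ×ˢ PySem.List.pyRange 0 M 1).filter
        (fun p => pvCell grid p.1 p.2 == '1')) = pvOnes N M grid from rfl]
  rw [pv_foldl_count_minmax]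
  simp

theorem pv_foldl_minmax_comp (l : List (Int × Int)) (st : Int × Int × Int × Int) :
    l.foldl pvMinMax st
      = ((l.map Prod.fst).foldl min st.1, (l.map Prod.fst).foldl max st.2.1,
         (l.map Prod.snd).foldl min st.2.2.1, (l.map Prod.snd).foldl max st.2.2.2) := by
  induction l generalizing st with
  | nil => simp
  | cons p l ih => rw [List.foldl_cons, ih]; rfl

theorem pvCheckCols_eq (grid : List String) (i : Int) (l : List Int) :
    pvCheckCols grid i l = l.all (fun j => pvCell grid i j == '1') := by
  induction l with
  | nil => rfl
  | cons j l ih =>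
      rw [pvCheckCols, List.all_cons, ih]
      cases h : pvCell grid i j == '1' <;> simp [bne, h]

theorem pvCheckRows_eq (grid : List String) (mc Mc : Int) (l : List Int) :
    pvCheckRows grid mc Mc l
      = l.all (fun i => (PySem.List.pyRange mc (Mc + 1) 1).all (fun j => pvCell grid i j == '1')) := by
  induction l with
  | nil => rfl
  | cons i l ih =>
      rw [pvCheckRows, List.all_cons, pvCheckCols_eq, ih]
      cases (PySem.List.pyRange mc (Mc + 1) 1).all (fun j => pvCell grid i j == '1')
      · simp
      · simp

theorem pv_all_product (xs ys : List Int) (f : Int × Int → Bool) :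
    (xs ×ˢ ys).all f = xs.all (fun a => ys.all (fun b => f (a, b))) := by
  induction xs with
  | nil => rfl
  | cons x xs ih => rw [List.product_cons, List.all_append, List.all_map, ih]; rfl

theorem pv_box_all (R C : List Int) (grid : List String) :
    R.all (fun i => C.all (fun j => pvCell grid i j == '1')) = (R ×ˢ C).all (pvP grid) := by
  rw [pv_all_product]
  rfl

theorem pv_mem_ones (N M : Int) (grid : List String) (p : Int × Int) :
    p ∈ pvOnes N M grid
      ↔ 0 ≤ p.1 ∧ p.1 < N ∧ 0 ≤ p.2 ∧ p.2 < M ∧ pvCell grid p.1 p.2 = '1' := by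
  obtain ⟨a, b⟩ := p
  simp [pvOnes, pvP, List.mem_filter, List.mem_product, PySem.List.mem_pyRange_one]
  tauto

theorem pv_nodup_ones (N M : Int) (grid : List String) : (pvOnes N M grid).Nodup :=
  List.Nodup.filter _
    (List.Nodup.product (PySem.List.nodup_pyRange_one 0 N) (PySem.List.nodup_pyRange_one 0 M))

theorem pv_decision (N M : Int) (grid : List String) (h1 : 0 ≤ N ∨ 0 ≤ M) :
    pvCheckRows grid (List.foldl min M (List.map Prod.snd (pvOnes N M grid)))
        (List.foldl max (-1) (List.map Prod.snd (pvOnes N M grid)))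
        (PySem.List.pyRange (List.foldl min N (List.map Prod.fst (pvOnes N M grid)))
          (List.foldl max (-1) (List.map Prod.fst (pvOnes N M grid)) + 1))
      = ((((pvOnes N M grid).length : Int)) == 0 ||
          (List.foldl max (-1) (List.map Prod.fst (pvOnes N M grid)) -
              List.foldl min N (List.map Prod.fst (pvOnes N M grid)) + 1) *
            (List.foldl max (-1) (List.map Prod.snd (pvOnes N M grid)) -
              List.foldl min M (List.map Prod.snd (pvOnes N M grid)) + 1) ==
          ((pvOnes N M grid).length : Int)) := by
  set ones := pvOnes N M grid with hones
  rcases eq_or_ne ones [] with hE | hne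
  · rw [hE]
    simp only [List.map_nil, List.foldl_nil, List.length_nil, Nat.cast_zero]
    rw [show ((0 : Int) == 0) = true from rfl, Bool.true_or, pvCheckRows_eq]
    rcases h1 with hN | hM
    · rw [show (-1 : Int) + 1 = 0 from rfl, PySem.List.pyRange_one_eq_nil hN]
      rfl
    · rw [show (-1 : Int) + 1 = 0 from rfl]
      simp [PySem.List.pyRange_one_eq_nil hM, List.all_eq_true]
  · obtain ⟨p0, hp0⟩ := List.exists_mem_of_ne_nil ones hne
    have hmem : ∀ p ∈ ones, 0 ≤ p.1 ∧ p.1 < N ∧ 0 ≤ p.2 ∧ p.2 < M ∧ pvCell grid p.1 p.2 = '1' :=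
      fun p hp => (pv_mem_ones N M grid p).1 (hones ▸ hp)
    set fs := List.map Prod.fst ones with hfs
    set ss := List.map Prod.snd ones with hss
    set mr := List.foldl min N fs with hmr
    set Mr := List.foldl max (-1) fs with hMr
    set mc := List.foldl min M ss with hmc
    set Mc := List.foldl max (-1) ss with hMc
    have hb : ∀ p ∈ ones, mr ≤ p.1 ∧ p.1 ≤ Mr ∧ mc ≤ p.2 ∧ p.2 ≤ Mc := fun p hp =>
      ⟨(PySem.List.foldl_min_le fs N).2 _ (List.mem_map_of_mem hp),
       (PySem.List.le_foldl_max fs (-1)).2 _ (List.mem_map_of_mem hp),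
       (PySem.List.foldl_min_le ss M).2 _ (List.mem_map_of_mem hp),
       (PySem.List.le_foldl_max ss (-1)).2 _ (List.mem_map_of_mem hp)⟩
    have hp0m := hmem p0 hp0
    have hp0b := hb p0 hp0
    have hmrB : 0 ≤ mr ∧ mr ≤ Mr ∧ Mr < N := by
      rcases PySem.List.foldl_min_mem fs N with h | h
      · omega
      · obtain ⟨q, hq, hq1⟩ := List.mem_map.1 h
        have hqm := hmem q hq
        rcases PySem.List.foldl_max_mem fs (-1) with h' | h'
        · omega
        · obtain ⟨q', hq', hq1'⟩ := List.mem_map.1 h'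
          have hqm' := hmem q' hq'
          omega
    have hmcB : 0 ≤ mc ∧ mc ≤ Mc ∧ Mc < M := by
      rcases PySem.List.foldl_min_mem ss M with h | h
      · omega
      · obtain ⟨q, hq, hq1⟩ := List.mem_map.1 h
        have hqm := hmem q hq
        rcases PySem.List.foldl_max_mem ss (-1) with h' | h'
        · omega
        · obtain ⟨q', hq', hq1'⟩ := List.mem_map.1 h'
          have hqm' := hmem q' hq'
          omega
    have hlen : 0 < ones.length := List.length_pos_iff.mpr hne
    have hc0 : (((ones.length : Int)) == 0) = false := by
      simp only [beq_eq_false_iff_ne, ne_eq]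
      omega
    rw [hc0, Bool.false_or, pvCheckRows_eq, pv_box_all]
    have hones_sub : ones ⊆ (PySem.List.pyRange mr (Mr + 1) 1 ×ˢ PySem.List.pyRange mc (Mc + 1) 1) := by
      intro p hp
      have h4 := hb p hp
      obtain ⟨a, b⟩ := p
      simp only at h4
      exact List.mem_product.2 ⟨PySem.List.mem_pyRange_one.2 ⟨h4.1, by omega⟩,
        PySem.List.mem_pyRange_one.2 ⟨h4.2.2.1, by omega⟩⟩
    have hnodup_box : ((PySem.List.pyRange mr (Mr + 1) 1 ×ˢ PySem.List.pyRange mc (Mc + 1) 1)).Nodup :=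
      List.Nodup.product (PySem.List.nodup_pyRange_one _ _) (PySem.List.nodup_pyRange_one _ _)
    have hnodup_ones : ones.Nodup := hones ▸ pv_nodup_ones N M grid
    have hlen_le : ones.length ≤ (PySem.List.pyRange mr (Mr + 1) 1 ×ˢ PySem.List.pyRange mc (Mc + 1) 1).length :=
      (List.subperm_of_subset hnodup_ones hones_sub).length_le
    have hbox_len : (((PySem.List.pyRange mr (Mr + 1) 1 ×ˢ PySem.List.pyRange mc (Mc + 1) 1)).length : Int)
        = (Mr - mr + 1) * (Mc - mc + 1) := by
      rw [List.length_product, PySem.List.length_pyRange_one, PySem.List.length_pyRange_one,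
        Nat.cast_mul, Int.toNat_of_nonneg (by omega), Int.toNat_of_nonneg (by omega)]
      ring
    have hiff : ((PySem.List.pyRange mr (Mr + 1) 1 ×ˢ PySem.List.pyRange mc (Mc + 1) 1)).all (pvP grid) = true
        ↔ (PySem.List.pyRange mr (Mr + 1) 1 ×ˢ PySem.List.pyRange mc (Mc + 1) 1).length = ones.length := by
      constructor
      · intro hall
        refine le_antisymm ?_ hlen_le
        refine (List.subperm_of_subset hnodup_box ?_).length_le
        rintro ⟨a, b⟩ hp
        have hm := List.mem_product.1 hp
        have ha := PySem.List.mem_pyRange_one.1 hm.1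
        have hbb := PySem.List.mem_pyRange_one.1 hm.2
        have hP := List.all_eq_true.1 hall _ hp
        rw [hones]
        refine (pv_mem_ones N M grid (a, b)).2 ⟨by omega, by omega, by omega, by omega, ?_⟩
        simpa [pvP] using hP
      · intro hl
        have hperm := (List.subperm_of_subset hnodup_ones hones_sub).perm_of_length_le (le_of_eq hl)
        refine List.all_eq_true.2 ?_
        intro p hp
        have hpo : p ∈ ones := hperm.mem_iff.2 hp
        have h5 := hmem p hpo
        simp [pvP, h5.2.2.2.2]
    have harea : (((Mr - mr + 1) * (Mc - mc + 1)) == ((ones.length : Int))) = true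
        ↔ (PySem.List.pyRange mr (Mr + 1) 1 ×ˢ PySem.List.pyRange mc (Mc + 1) 1).length = ones.length := by
      rw [beq_iff_eq, ← hbox_len]
      constructor <;> intro h <;> exact_mod_cast h
    rw [Bool.eq_iff_iff]
    exact hiff.trans harea.symm

theorem pvCase_eq (c : Int × Int × List String)
    (h1 : 0 ≤ c.1 ∨ 0 ≤ c.2.1) : pvCaseA c = pvCaseB c := by
  obtain ⟨N, M, grid⟩ := c
  simp only at h1
  simp only [pvCaseA, pvCaseB, pvScanA_eq, pvScanB_eq, pv_foldl_minmax_comp]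
  rw [pv_decision N M grid h1]

-- ===== VERDICT (by name: the statement is the Claim_ definition above) =====
theorem is_rectangle_of_ones_spec : Claim_equal_is_rectangle_of_ones := by
  intro tcs _ hpre
  unfold Spec_is_rectangle_of_ones is_rectangle_of_ones is_rectangle_of_ones_alt
  rw [PySem.List.foldl_append_singleton_eq_map]
  exact List.map_congr_left fun c hc => pvCase_eq c (hpre c hc).1
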